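-- pv_equiv track=rewrite | github.com/IvanTrendafilov/EXC-Hadoop | exctools.py | wordExtractor
-- ===== SOURCE A (Python) =====
-- def wordExtractor(word):
-- 	result = ""
-- 	word = word.strip()
-- 	position = -1
-- 	found = False
-- 	dcount = False
-- 	for char in word:
-- 		position += 1
-- 		if char.isalnum():
-- 			found = True
-- 			result += char
-- 		elif char == '-' and found and not dcount:
-- 			try:
-- 				if word[position - 1].isalnum() and word[position + 1].isalnum():
-- 					result += char
-- 				dcount = True
-- 			except:
-- 				if found:
-- 					break
-- 		elif found:
-- 			break
-- 	return result
-- ===== SOURCE B (Python) =====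
-- def wordExtractor(word):
--     w = word.strip()
--     n = len(w)
--     i = 0
--     while i < n and not w[i].isalnum():
--         i += 1
--     j = i
--     while j < n and w[j].isalnum():
--         j += 1
--     if j == i:
--         return ""
--     if j + 1 < n and w[j] == '-' and w[j + 1].isalnum():
--         k = j + 1
--         while k < n and w[k].isalnum():
--             k += 1
--         return w[i:k]
--     return w[i:j]
-- ===== Notes on version B (the rewrite author's own statement) =====
-- stated objective: simpler
-- what changed: Replaces A's char-by-char state machine (position counter, found/dcount flags, try/except around neighbour indexing, char-by-char result concatenation) by an index-scan decomposition: skip leading non-alphanumerics, slice the maximal alphanumeric run, and extend once across an interior hyphen only when the next char is alphanumeric.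
import Mathlib
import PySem

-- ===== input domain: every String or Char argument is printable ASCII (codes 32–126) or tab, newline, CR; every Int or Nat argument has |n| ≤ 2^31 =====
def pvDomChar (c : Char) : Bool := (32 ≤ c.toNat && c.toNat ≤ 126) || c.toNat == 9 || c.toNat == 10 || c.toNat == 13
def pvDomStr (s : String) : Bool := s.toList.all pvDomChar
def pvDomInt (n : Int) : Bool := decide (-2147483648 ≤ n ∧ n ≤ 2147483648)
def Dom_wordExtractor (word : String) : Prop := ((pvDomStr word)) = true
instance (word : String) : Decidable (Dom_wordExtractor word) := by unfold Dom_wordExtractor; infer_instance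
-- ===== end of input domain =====

-- B replaces A's flag-driven char-by-char state machine by a plain index-scan
-- decomposition (skip, slice the alnum run, optionally extend once over '-'); objective: simpler.


-- ===== PORT A =====
-- `for char in word` with `position`, `result`, `found`, `dcount` and `break`;
-- w is the full stripped string (for word[position-1] / word[position+1]),
-- rest the part of it still to iterate.  `try/except` around the neighbour
-- lookups becomes a match on PySem.List.pyGet? (none = IndexError), with
-- Python's short-circuit `and` kept (the second lookup only happens when the
-- first char is alphanumeric).
def wordExtractorLoop (w : List Char) (rest : List Char) (pos : Int)
    (res : List Char) (found dcount : Bool) : List Char :=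
  match rest with
  | [] => res
  | c :: cs =>
    let position := pos + 1
    if PySem.Chars.isalnum c then
      wordExtractorLoop w cs position (res ++ [c]) true dcount
    else if c == '-' && found && !dcount then
      match PySem.List.pyGet? w (position - 1) with
      | none => if found then res else wordExtractorLoop w cs position res found dcount
      | some p =>
        if PySem.Chars.isalnum p then
          match PySem.List.pyGet? w (position + 1) with
          | none => if found then res else wordExtractorLoop w cs position res found dcount
          | some q =>
            if PySem.Chars.isalnum q then
              wordExtractorLoop w cs position (res ++ [c]) found true
            else
              wordExtractorLoop w cs position res found true
        else
          wordExtractorLoop w cs position res found true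
    else if found then res
    else wordExtractorLoop w cs position res found dcount

def wordExtractor (word : String) : String :=
  let w := (PySem.Str.strip word).toList
  String.ofList (wordExtractorLoop w w (-1) [] false false)

-- ===== PORT B =====
-- `while i < n and p(w[i]): i += 1` as a recursion on the index.
def scanWhile (p : Char → Bool) (w : List Char) (i : Nat) : Nat :=
  if h : i < w.length then
    if p w[i] then scanWhile p w (i + 1) else i
  else i
termination_by w.length - i

def wordExtractor_alt (word : String) : String :=
  let w := (PySem.Str.strip word).toList
  let n := w.length
  let i := scanWhile (fun c => !PySem.Chars.isalnum c) w 0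
  let j := scanWhile (fun c => PySem.Chars.isalnum c) w i
  if j = i then ""
  else if j + 1 < n then
    -- j+1 < n was just checked, so the getD defaults are never used
    if w.getD j ' ' == '-' && PySem.Chars.isalnum (w.getD (j + 1) ' ') then
      let k := scanWhile (fun c => PySem.Chars.isalnum c) w (j + 1)
      String.ofList (PySem.List.slice w (some (i : Int)) (some (k : Int)))
    else
      String.ofList (PySem.List.slice w (some (i : Int)) (some (j : Int)))
  else
    String.ofList (PySem.List.slice w (some (i : Int)) (some (j : Int)))

-- ===== PRECONDITION & SPEC =====
def Spec_wordExtractor (word : String) (out : String) : Prop := out = wordExtractor_alt word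
instance (word : String) (out : String) : Decidable (Spec_wordExtractor word out) := by unfold Spec_wordExtractor; infer_instance

-- ===== CLAIM (what is proved, stated in full; the proofs are below) =====
def Claim_equal_wordExtractor : Prop := ∀ (word : String), Dom_wordExtractor word → Spec_wordExtractor word (wordExtractor word)

-- ===== LEMMAS AND PROOFS =====

theorem scanWhile_ge (p : Char → Bool) (w : List Char) (i : Nat) :
    i ≤ scanWhile p w i := by
  fun_induction scanWhile p w i with
  | case1 i h hp ih => omega
  | case2 => omega
  | case3 => omega

theorem scanWhile_le (p : Char → Bool) (w : List Char) (i : Nat) (hi : i ≤ w.length) :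
    scanWhile p w i ≤ w.length := by
  fun_induction scanWhile p w i with
  | case1 i h hp ih => exact ih (by omega)
  | case2 => omega
  | case3 => omega

theorem scanWhile_stop (p : Char → Bool) (w : List Char) (i : Nat)
    (h : scanWhile p w i < w.length) : p (w[scanWhile p w i]'h) = false := by
  fun_induction scanWhile p w i with
  | case1 i h hp ih => exact ih _
  | case2 i h hp => simpa using hp
  | case3 i h => omega

theorem scanWhile_eq_self (p : Char → Bool) (w : List Char) (i : Nat)
    (h : i < w.length) (hp : p (w[i]'h) = false) : scanWhile p w i = i := by
  unfold scanWhile; simp [h, hp]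

theorem scanWhile_eq_succ (p : Char → Bool) (w : List Char) (i : Nat)
    (h : i < w.length) (hp : p (w[i]'h) = true) : scanWhile p w i = scanWhile p w (i + 1) := by
  rw [scanWhile]; simp [h, hp]

theorem scanWhile_of_ge (p : Char → Bool) (w : List Char) (i : Nat)
    (h : w.length ≤ i) : scanWhile p w i = i := by
  unfold scanWhile; simp [Nat.not_lt.mpr h]

-- B's tail from the collect point: what B appends after position i, given that
-- the alphanumeric run continues at i.
def bTail (w : List Char) (i : Nat) : List Char :=
  let j := scanWhile (fun c => PySem.Chars.isalnum c) w i
  if h : j + 1 < w.length then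
    if (w[j]'(by omega)) == '-' && PySem.Chars.isalnum (w[j + 1]'h) then
      (w.drop i).take (j - i) ++ '-' ::
        (w.drop (j + 1)).take (scanWhile (fun c => PySem.Chars.isalnum c) w (j + 1) - (j + 1))
    else (w.drop i).take (j - i)
  else (w.drop i).take (j - i)

-- Phase 3: found ∧ dcount — collect the alphanumeric run, stop at anything else.
theorem loop_phase3 (w : List Char) (i : Nat) (res : List Char) (hi : i ≤ w.length) :
    wordExtractorLoop w (w.drop i) ((i : Int) - 1) res true true =
      res ++ (w.drop i).take (scanWhile (fun c => PySem.Chars.isalnum c) w i - i) := by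
  induction hd : w.length - i generalizing i res with
  | zero =>
    have hIL : i = w.length := by omega
    subst hIL
    simp [List.drop_length, wordExtractorLoop, scanWhile_of_ge _ _ _ (le_refl _)]
  | succ n ih =>
    have hi' : i < w.length := by omega
    rw [List.drop_eq_getElem_cons hi']
    by_cases halnum : PySem.Chars.isalnum w[i] = true
    · have hpos : ((i : Int) - 1) + 1 = ((i + 1 : Nat) : Int) - 1 := by push_cast; ring
      have hscan := scanWhile_eq_succ (fun c => PySem.Chars.isalnum c) w i hi' halnum
      have hge : i + 1 ≤ scanWhile (fun c => PySem.Chars.isalnum c) w i := by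
        rw [hscan]; exact scanWhile_ge _ _ _
      simp only [wordExtractorLoop, halnum, if_true]
      rw [hpos, ih (i + 1) (res ++ [w[i]]) (by omega) (by omega)]
      have htake : scanWhile (fun c => PySem.Chars.isalnum c) w i - i =
          (scanWhile (fun c => PySem.Chars.isalnum c) w (i + 1) - (i + 1)) + 1 := by
        rw [hscan]; omega
      simp only [htake, List.append_assoc, List.singleton_append]
      rw [List.take_succ_cons]
    · have hscan := scanWhile_eq_self (fun c => PySem.Chars.isalnum c) w i hi'
        (by simpa using halnum)
      simp [wordExtractorLoop, halnum, hscan]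

-- bTail commutes with peeling one alphanumeric char.
theorem bTail_cons (w : List Char) (i : Nat) (hi' : i < w.length)
    (h : PySem.Chars.isalnum (w[i]'hi') = true) :
    bTail w i = w[i] :: bTail w (i + 1) := by
  unfold bTail
  have hscan := scanWhile_eq_succ (fun c => PySem.Chars.isalnum c) w i hi' h
  have hge : i + 1 ≤ scanWhile (fun c => PySem.Chars.isalnum c) w (i + 1) :=
    scanWhile_ge _ _ _
  simp only [hscan]
  have htake : (w.drop i).take (scanWhile (fun c => PySem.Chars.isalnum c) w (i + 1) - i) =
      w[i] :: (w.drop (i + 1)).take (scanWhile (fun c => PySem.Chars.isalnum c) w (i + 1) - (i + 1)) := by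
    rw [List.drop_eq_getElem_cons hi']
    have hsub : scanWhile (fun c => PySem.Chars.isalnum c) w (i + 1) - i =
        (scanWhile (fun c => PySem.Chars.isalnum c) w (i + 1) - (i + 1)) + 1 := by omega
    rw [hsub, List.take_succ_cons]
  split
  · split
    · simp [htake]
    · simp [htake]
  · simp [htake]

theorem loop_phase2 (w : List Char) (i : Nat) (res : List Char) (hi : i ≤ w.length)
    (h1 : 1 ≤ i) (hprev : PySem.Chars.isalnum (w[i - 1]'(by omega)) = true) :
    wordExtractorLoop w (w.drop i) ((i : Int) - 1) res true false = res ++ bTail w i := by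
  induction hd : w.length - i generalizing i res with
  | zero =>
    have hIL : i = w.length := by omega
    subst hIL
    simp [List.drop_length, wordExtractorLoop, bTail, scanWhile_of_ge _ _ _ (le_refl _)]
  | succ n ih =>
    have hi' : i < w.length := by omega
    rw [List.drop_eq_getElem_cons hi']
    by_cases halnum : PySem.Chars.isalnum w[i] = true
    · have hpos : ((i : Int) - 1) + 1 = ((i + 1 : Nat) : Int) - 1 := by push_cast; ring
      simp only [wordExtractorLoop, halnum, if_true]
      rw [hpos, ih (i + 1) (res ++ [w[i]]) (by omega) (by omega) (by simpa using halnum) (by omega)]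
      rw [bTail_cons w i hi' halnum]
      simp
    · have hscan := scanWhile_eq_self (fun c => PySem.Chars.isalnum c) w i hi'
        (by simpa using halnum)
      have hposI : ((i : Int) - 1) + 1 = (i : Int) := by ring
      rw [wordExtractorLoop]
      simp only [hposI]
      rw [if_neg halnum]
      by_cases hdash : w[i] = '-'
      · rw [if_pos (by simp [hdash])]
        have hprevGet : PySem.List.pyGet? w ((i : Int) - 1) = some (w[i - 1]'(by omega)) := by
          have hcast : (i : Int) - 1 = ((i - 1 : Nat) : Int) := by omega
          rw [hcast, PySem.List.pyGet?_natCast, List.getElem?_eq_getElem (by omega)]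
        rw [hprevGet]; dsimp only
        simp only [hprev, if_true]
        by_cases hnext : i + 1 < w.length
        · have hnextGet : PySem.List.pyGet? w ((i : Int) + 1) = some (w[i + 1]'hnext) := by
            have hcast : (i : Int) + 1 = ((i + 1 : Nat) : Int) := by push_cast; ring
            rw [hcast, PySem.List.pyGet?_natCast, List.getElem?_eq_getElem hnext]
          rw [hnextGet]; dsimp only
          have hpos2 : (i : Int) = ((i + 1 : Nat) : Int) - 1 := by push_cast; ring
          by_cases hal2 : PySem.Chars.isalnum (w[i + 1]'hnext) = true
          · -- extend across the hyphen
            rw [if_pos hal2, hpos2, loop_phase3 w (i + 1) (res ++ [w[i]]) (by omega)]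
            unfold bTail
            simp only [hscan]
            rw [dif_pos (by omega : i + 1 < w.length)]
            rw [if_pos (by simp [hdash, hal2])]
            simp [hdash]
          · -- hyphen but next char not alphanumeric: dcount set, then break
            rw [if_neg hal2, hpos2, loop_phase3 w (i + 1) res (by omega)]
            have hscan2 : scanWhile (fun c => PySem.Chars.isalnum c) w (i + 1) = i + 1 :=
              scanWhile_eq_self _ _ _ hnext (by simpa using hal2)
            unfold bTail
            simp only [hscan]
            rw [dif_pos (by omega : i + 1 < w.length)]
            rw [if_neg (by simp [hal2])]
            simp [hscan2]
        · -- hyphen at the very end: IndexError, break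
          have hnextGet : PySem.List.pyGet? w ((i : Int) + 1) = none := by
            rw [PySem.List.pyGet?_eq_none_iff]
            unfold PySem.Raise.InRange
            omega
          rw [hnextGet]; dsimp only
          unfold bTail
          simp only [hscan]
          rw [dif_neg (by omega : ¬ (i + 1 < w.length))]
          simp
      · -- non-hyphen, non-alphanumeric: break
        rw [if_neg (by simp [hdash])]
        rw [if_pos trivial]
        unfold bTail
        simp only [hscan]
        by_cases hn2 : i + 1 < w.length
        · rw [dif_pos hn2]
          rw [if_neg (by simp [hdash])]
          simp
        · rw [dif_neg hn2]
          simp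

-- Phase 1: skip leading non-alphanumerics.
theorem loop_phase1 (w : List Char) (i : Nat) (hi : i ≤ w.length) :
    wordExtractorLoop w (w.drop i) ((i : Int) - 1) [] false false =
      if h : scanWhile (fun c => !PySem.Chars.isalnum c) w i < w.length then
        w[scanWhile (fun c => !PySem.Chars.isalnum c) w i] ::
          bTail w (scanWhile (fun c => !PySem.Chars.isalnum c) w i + 1)
      else [] := by
  induction hd : w.length - i generalizing i with
  | zero =>
    have hIL : i = w.length := by omega
    subst hIL
    rw [dif_neg (by simp [scanWhile_of_ge _ _ _ (le_refl _)])]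
    simp [List.drop_length, wordExtractorLoop]
  | succ n ih =>
    have hi' : i < w.length := by omega
    rw [List.drop_eq_getElem_cons hi']
    have hposI : ((i : Int) - 1) + 1 = (i : Int) := by ring
    by_cases halnum : PySem.Chars.isalnum w[i] = true
    · have hscan := scanWhile_eq_self (fun c => !PySem.Chars.isalnum c) w i hi'
        (by simp [halnum])
      rw [wordExtractorLoop]
      simp only [hposI]
      rw [if_pos halnum]
      have hpos2 : (i : Int) = ((i + 1 : Nat) : Int) - 1 := by push_cast; ring
      rw [hpos2, show ([] : List Char) ++ [w[i]] = [w[i]] from List.nil_append _,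
        loop_phase2 w (i + 1) [w[i]] (by omega) (by omega) (by simpa using halnum)]
      rw [dif_pos (by omega : scanWhile (fun c => !PySem.Chars.isalnum c) w i < w.length)]
      simp [hscan]
    · have hscan := scanWhile_eq_succ (fun c => !PySem.Chars.isalnum c) w i hi'
        (by simp [halnum])
      rw [wordExtractorLoop]
      simp only [hposI]
      rw [if_neg halnum]
      rw [if_neg (by simp), if_neg (by simp)]
      have hpos2 : (i : Int) = ((i + 1 : Nat) : Int) - 1 := by push_cast; ring
      rw [hpos2, ih (i + 1) (by omega) (by omega)]
      simp only [hscan]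

-- Splitting one take across a known character.
theorem take_split (w : List Char) (i j k : Nat) (hij : i ≤ j) (hj : j < w.length)
    (hjk : j + 1 ≤ k) :
    (w.drop i).take (k - i) =
      (w.drop i).take (j - i) ++ w[j] :: (w.drop (j + 1)).take (k - (j + 1)) := by
  have hk : k - i = (j - i) + (k - j) := by omega
  rw [hk, List.take_add, List.drop_drop]
  have hji : i + (j - i) = j := by omega
  rw [hji]
  congr 1
  rw [List.drop_eq_getElem_cons hj]
  have hkj : k - j = (k - (j + 1)) + 1 := by omega
  rw [hkj, List.take_succ_cons]

-- Peeling the first character of a run off a take.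
theorem take_peel (w : List Char) (i j : Nat) (hi : i < w.length) (hij : i + 1 ≤ j) :
    (w.drop i).take (j - i) = w[i] :: (w.drop (i + 1)).take (j - (i + 1)) := by
  rw [List.drop_eq_getElem_cons hi]
  have : j - i = (j - (i + 1)) + 1 := by omega
  rw [this, List.take_succ_cons]

-- Assembling the two sides once every scan result is an opaque variable.
theorem assemble (w : List Char) (i j k : Nat) (hlt : i < w.length)
    (hj1 : i + 1 ≤ j) (hk1 : j + 1 ≤ k) :
    String.ofList ((w[i]'hlt) ::
      if h : j + 1 < w.length then
        if ((w[j]'(by omega)) == '-' && PySem.Chars.isalnum (w[j + 1]'h)) = true then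
          (w.drop (i + 1)).take (j - (i + 1)) ++ '-' :: (w.drop (j + 1)).take (k - (j + 1))
        else (w.drop (i + 1)).take (j - (i + 1))
      else (w.drop (i + 1)).take (j - (i + 1))) =
    (if j = i then "" else
     if j + 1 < w.length then
       if (w.getD j ' ' == '-' && PySem.Chars.isalnum (w.getD (j + 1) ' ')) = true then
         String.ofList (PySem.List.slice w (some (i : Int)) (some (k : Int)))
       else String.ofList (PySem.List.slice w (some (i : Int)) (some (j : Int)))
     else String.ofList (PySem.List.slice w (some (i : Int)) (some (j : Int)))) := by
  rw [if_neg (by omega : ¬ j = i)]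
  by_cases hn : j + 1 < w.length
  · have hjlt : j < w.length := by omega
    rw [dif_pos hn, if_pos hn,
      show w.getD j ' ' = w[j]'hjlt from by
        simp [List.getD_eq_getElem?_getD, List.getElem?_eq_getElem hjlt],
      show w.getD (j + 1) ' ' = w[j + 1]'hn from by
        simp [List.getD_eq_getElem?_getD, List.getElem?_eq_getElem hn]]
    by_cases hcond : ((w[j]'hjlt) == '-' && PySem.Chars.isalnum (w[j + 1]'hn)) = true
    · rw [if_pos hcond, if_pos hcond]
      have hdash : w[j]'hjlt = '-' := by
        have h2 := hcond
        simp only [Bool.and_eq_true, beq_iff_eq] at h2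
        exact h2.1
      rw [PySem.List.slice_natCast, take_split w i j k (by omega) hjlt hk1, hdash,
        take_peel w i j hlt hj1]
      simp
    · rw [if_neg hcond, if_neg hcond, PySem.List.slice_natCast, take_peel w i j hlt hj1]
  · rw [dif_neg hn, if_neg hn, PySem.List.slice_natCast, take_peel w i j hlt hj1]

-- ===== VERDICT (by name: the statement is the Claim_ definition above) =====
theorem wordExtractor_spec : Claim_equal_wordExtractor := by
  intro word _
  simp only [Spec_wordExtractor, wordExtractor, wordExtractor_alt]
  have h0 := loop_phase1 ((PySem.Str.strip word).toList) 0 (by omega)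
  simp only [List.drop_zero, Nat.cast_zero, zero_sub] at h0
  rw [h0]
  clear h0
  generalize (PySem.Str.strip word).toList = w
  generalize hi : scanWhile (fun c => !PySem.Chars.isalnum c) w 0 = i
  have hile : i ≤ w.length := by rw [← hi]; exact scanWhile_le _ _ _ (by omega)
  by_cases hlt : i < w.length
  · rw [dif_pos hlt]
    have halnum : PySem.Chars.isalnum (w[i]'hlt) = true := by
      have hstop := scanWhile_stop (fun c => !PySem.Chars.isalnum c) w 0 (by rw [hi]; exact hlt)
      simp only [hi] at hstop
      simpa using hstop
    have hscan : scanWhile (fun c => PySem.Chars.isalnum c) w i =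
        scanWhile (fun c => PySem.Chars.isalnum c) w (i + 1) :=
      scanWhile_eq_succ _ w i hlt halnum
    unfold bTail
    simp only [← hscan]
    have hj1 : i + 1 ≤ scanWhile (fun c => PySem.Chars.isalnum c) w i := by
      rw [hscan]; exact scanWhile_ge _ _ _
    exact assemble w i (scanWhile (fun c => PySem.Chars.isalnum c) w i)
      (scanWhile (fun c => PySem.Chars.isalnum c) w
        (scanWhile (fun c => PySem.Chars.isalnum c) w i + 1))
      hlt hj1 (scanWhile_ge _ _ _)
  · rw [dif_neg hlt]
    have hsame : scanWhile (fun c => PySem.Chars.isalnum c) w i = i :=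
      scanWhile_of_ge _ _ _ (by omega)
    rw [hsame, if_pos rfl]
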